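-- pv_equiv track=rewrite | github.com/devinllc/cricketvid | app/engine/bounce.py | detect_bounce_index
-- ===== SOURCE A (Python) =====
-- from typing import List, Optional, Tuple
--
-- def detect_bounce_index(points: List[Tuple[int, int]]) -> Optional[int]:
--     """Detect bounce as local maximum in image y (y increases downward)."""
--     if len(points) < 6:
--         return None
--
--     ys = [p[1] for p in points]
--     best_i = None
--     best_y = -1
--     for i in range(1, len(ys) - 1):
--         if ys[i] >= ys[i - 1] and ys[i] >= ys[i + 1] and ys[i] > best_y:
--             best_y = ys[i]
--             best_i = i
--     return best_i
-- ===== SOURCE B (Python) =====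
-- from typing import List, Optional, Tuple
--
-- def detect_bounce_index(points: List[Tuple[int, int]]) -> Optional[int]:
--     """Detect bounce as local maximum in image y (y increases downward).
--
--     Sort-then-scan: visit the interior indices in order of decreasing y
--     (ties by increasing index) and return the first one that is a local
--     maximum; no running best is maintained."""
--     if len(points) < 6:
--         return None
--     ys = [p[1] for p in points]
--     for i in sorted(range(1, len(ys) - 1), key=lambda i: (-ys[i], i)):
--         if ys[i - 1] <= ys[i] >= ys[i + 1]:
--             return i
--     return None
-- ===== Notes on version B (the rewrite author's own statement) =====
-- stated objective: alternative
-- what changed: Replaced A's accumulator-threaded best_i/best_y scan with sort-then-scan: sort the interior indices by decreasing y (ties by index) and return the first local maximum encountered, so no running best is kept.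
-- intended difference: On lists of at least 6 points that have a local-maximum y but whose local-maximum y-values are all <= -1, A returns None because its accumulator starts at best_y = -1, while B returns the index of the highest local maximum, which is the intended bounce point. — e.g. on detect_bounce_index([(0, -5), (1, -4), (2, -5), (3, -5), (4, -5), (5, -5)]): A returns none, B returns some 1
import Mathlib
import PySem

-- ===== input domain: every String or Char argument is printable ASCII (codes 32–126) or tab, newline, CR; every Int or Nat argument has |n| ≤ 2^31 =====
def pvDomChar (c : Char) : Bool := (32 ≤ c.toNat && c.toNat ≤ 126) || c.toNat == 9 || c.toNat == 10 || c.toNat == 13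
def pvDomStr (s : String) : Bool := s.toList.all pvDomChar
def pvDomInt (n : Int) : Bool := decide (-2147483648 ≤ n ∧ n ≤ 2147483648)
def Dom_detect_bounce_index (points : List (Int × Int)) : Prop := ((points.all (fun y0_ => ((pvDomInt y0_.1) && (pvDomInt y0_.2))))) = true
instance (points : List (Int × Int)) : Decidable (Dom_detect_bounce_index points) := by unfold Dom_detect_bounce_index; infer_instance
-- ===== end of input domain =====

-- B replaces A's accumulator-threaded best_i/best_y scan by sort-then-scan: sort the interior
-- indices by (-y, index) and return the first local maximum in that order (objective:
-- alternative algorithm); return value only, no side effects.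

-- ===== PORT A =====
def detect_bounce_index (points : List (Int × Int)) : Option Int :=
  if points.length < 6 then none
  else
    let ys := points.map Prod.snd
    let r := (PySem.List.pyRange 1 ((ys.length : Int) - 1) 1).foldl
      (fun (st : Option Int × Int) i =>
        if PySem.List.pyGetD ys (i - 1) 0 ≤ PySem.List.pyGetD ys i 0 ∧
           PySem.List.pyGetD ys (i + 1) 0 ≤ PySem.List.pyGetD ys i 0 ∧
           st.2 < PySem.List.pyGetD ys i 0
        then (some i, PySem.List.pyGetD ys i 0)
        else st)
      (none, -1)
    r.1

-- ===== PORT B =====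
def detect_bounce_index_alt (points : List (Int × Int)) : Option Int :=
  if points.length < 6 then none
  else
    let ys := points.map Prod.snd
    (PySem.List.sorted2 (PySem.List.pyRange 1 ((ys.length : Int) - 1) 1)
        (fun i => -(PySem.List.pyGetD ys i 0)) (fun i => i) false).find?
      (fun i => decide (PySem.List.pyGetD ys (i - 1) 0 ≤ PySem.List.pyGetD ys i 0) &&
                decide (PySem.List.pyGetD ys (i + 1) 0 ≤ PySem.List.pyGetD ys i 0))

-- ===== PRECONDITION & SPEC =====
-- On lists of ≥ 6 points that have a local-maximum y but whose local-maximum y-values are all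
-- ≤ -1, A returns none (its accumulator starts at best_y = -1) while B returns the index of the
-- highest local maximum, which is the intended bounce point.
def pvPeaks (ys : List Int) : List Int :=
  (ys.zip (ys.tail.zip ys.tail.tail)).filterMap fun (a, b, c) => if a ≤ b ∧ c ≤ b then some b else none

def D_detect_bounce_index (points : List (Int × Int)) : Prop :=
  6 ≤ points.length ∧ (pvPeaks (points.map Prod.snd)).max?.any (· ≤ -1)

instance (points : List (Int × Int)) : Decidable (D_detect_bounce_index points) := by
  unfold D_detect_bounce_index; infer_instance

def Spec_detect_bounce_index (points : List (Int × Int)) (out : Option Int) : Prop :=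
  ¬ D_detect_bounce_index points → out = detect_bounce_index_alt points
instance (points : List (Int × Int)) (out : Option Int) : Decidable (Spec_detect_bounce_index points out) := by
  unfold Spec_detect_bounce_index; infer_instance

def pvDiffWitness_detect_bounce_index : (List (Int × Int)) :=
  [(0, -5), (1, -4), (2, -5), (3, -5), (4, -5), (5, -5)]
def pvDiffWitnessOut_detect_bounce_index : (Option Int) × (Option Int) := (none, some 1)

-- ===== CLAIM (what is proved, stated in full; the proofs are below) =====
def Claim_unchanged_detect_bounce_index : Prop := ∀ (points : List (Int × Int)), Dom_detect_bounce_index points → Spec_detect_bounce_index points (detect_bounce_index points)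
def Claim_changed_detect_bounce_index : Prop := Dom_detect_bounce_index (pvDiffWitness_detect_bounce_index) ∧ D_detect_bounce_index (pvDiffWitness_detect_bounce_index) ∧ detect_bounce_index (pvDiffWitness_detect_bounce_index) = pvDiffWitnessOut_detect_bounce_index.1 ∧ detect_bounce_index_alt (pvDiffWitness_detect_bounce_index) = pvDiffWitnessOut_detect_bounce_index.2 ∧ pvDiffWitnessOut_detect_bounce_index.1 ≠ pvDiffWitnessOut_detect_bounce_index.2
def Claim_exact_detect_bounce_index : Prop := ∀ (points : List (Int × Int)), Dom_detect_bounce_index points → D_detect_bounce_index points → detect_bounce_index points ≠ detect_bounce_index_alt points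

-- ===== LEMMAS AND PROOFS =====

-- index form of a peak, for the proofs
def pvPeak (ys : List Int) (k : Nat) : Bool :=
  decide (0 < k ∧ k + 1 < ys.length ∧
    ys.getD (k - 1) 0 ≤ ys.getD k 0 ∧ ys.getD (k + 1) 0 ≤ ys.getD k 0)

theorem pvPeak_cons {a : Int} {l : List Int} {k : Nat} (hk : 1 ≤ k) :
    pvPeak (a :: l) (k + 1) = pvPeak l k := by
  rw [pvPeak, pvPeak, decide_eq_decide]
  have e1 : (a :: l).getD (k + 1 - 1) 0 = l.getD (k - 1) 0 := by
    rw [show k + 1 - 1 = (k - 1) + 1 by omega, List.getD_cons_succ]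
  rw [e1, List.getD_cons_succ, List.getD_cons_succ]
  simp only [List.length_cons]
  constructor
  · rintro ⟨_, h2, h3, h4⟩; exact ⟨by omega, by omega, h3, h4⟩
  · rintro ⟨_, h2, h3, h4⟩; exact ⟨by omega, by omega, h3, h4⟩

theorem pvPeaks_cons3 (a b c : Int) (t : List Int) :
    pvPeaks (a :: b :: c :: t) =
      (if a ≤ b ∧ c ≤ b then [b] else []) ++ pvPeaks (b :: c :: t) := by
  by_cases h : a ≤ b ∧ c ≤ b <;> simp [pvPeaks, h]

theorem mem_pvPeaks : ∀ (ys : List Int) (x : Int),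
    x ∈ pvPeaks ys ↔ ∃ k : Nat, pvPeak ys k = true ∧ x = ys.getD k 0
  | [], x => by
    constructor
    · intro h; simp [pvPeaks] at h
    · rintro ⟨k, hpk, -⟩; simp [pvPeak] at hpk; try omega
  | [a], x => by
    constructor
    · intro h; simp [pvPeaks] at h
    · rintro ⟨k, hpk, -⟩; simp [pvPeak] at hpk; try omega
  | [a, b], x => by
    constructor
    · intro h; simp [pvPeaks] at h
    · rintro ⟨k, hpk, -⟩; simp [pvPeak] at hpk; try omega
  | a :: b :: c :: t, x => by
    have ih := mem_pvPeaks (b :: c :: t)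
    rw [pvPeaks_cons3]
    by_cases hbc : a ≤ b ∧ c ≤ b
    · rw [if_pos hbc]
      constructor
      · intro hx
        rcases List.mem_append.1 hx with hx | hx
        · rw [List.mem_singleton] at hx
          subst hx
          refine ⟨1, ?_, rfl⟩
          simp only [pvPeak, decide_eq_true_eq, List.length_cons, List.getD_cons_succ,
            List.getD_cons_zero]
          exact ⟨by omega, by omega, hbc.1, hbc.2⟩
        · obtain ⟨k, hpk, rfl⟩ := (ih x).1 hx
          have hk1 : 1 ≤ k := by
            have := (by simpa [pvPeak] using hpk : 0 < k ∧ _); omega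
          exact ⟨k + 1, by rw [pvPeak_cons hk1]; exact hpk, by rw [List.getD_cons_succ]⟩
      · rintro ⟨k, hpk, rfl⟩
        have hk0 : 0 < k := by
          have := (by simpa [pvPeak] using hpk : 0 < k ∧ _); omega
        rcases Nat.eq_or_lt_of_le hk0 with h1 | h1
        · rw [← h1, List.getD_cons_succ, List.getD_cons_zero]
          simp
        · obtain ⟨k', rfl⟩ : ∃ k', k = k' + 1 := ⟨k - 1, by omega⟩
          rw [pvPeak_cons (by omega)] at hpk
          exact List.mem_append_right _ ((ih _).2 ⟨k', hpk, by rw [List.getD_cons_succ]⟩)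
    · rw [if_neg hbc]
      simp only [List.nil_append]
      constructor
      · intro hx
        obtain ⟨k, hpk, rfl⟩ := (ih x).1 hx
        have hk1 : 1 ≤ k := by
          have := (by simpa [pvPeak] using hpk : 0 < k ∧ _); omega
        exact ⟨k + 1, by rw [pvPeak_cons hk1]; exact hpk, by rw [List.getD_cons_succ]⟩
      · rintro ⟨k, hpk, rfl⟩
        have hk0 : 0 < k := by
          have := (by simpa [pvPeak] using hpk : 0 < k ∧ _); omega
        rcases Nat.eq_or_lt_of_le hk0 with h1 | h1
        · exfalso
          rw [← h1] at hpk
          simp only [pvPeak, decide_eq_true_eq, List.getD_cons_succ, List.getD_cons_zero] at hpk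
          exact hbc ⟨hpk.2.2.1, hpk.2.2.2⟩
        · obtain ⟨k', rfl⟩ : ∃ k', k = k' + 1 := ⟨k - 1, by omega⟩
          rw [pvPeak_cons (by omega)] at hpk
          exact (ih _).2 ⟨k', hpk, by rw [List.getD_cons_succ]⟩

theorem pvAny_iff (o : Option Int) : o.any (· ≤ -1) = true ↔ ∃ m, o = some m ∧ m ≤ -1 := by
  cases o <;> simp

-- value at an Int index (total; exact on the in-range indices the programs use)
def pvVal (ys : List Int) (i : Int) : Int := PySem.List.pyGetD ys i 0
-- the local-maximum test, exactly B's find? predicate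
def pvLMb (ys : List Int) (i : Int) : Bool :=
  decide (pvVal ys (i - 1) ≤ pvVal ys i) && decide (pvVal ys (i + 1) ≤ pvVal ys i)
-- first-wins best (index, value) of a candidate list (A's accumulator, read off a list)
def pvBest (ys : List Int) : List Int → Option (Int × Int)
  | [] => none
  | i :: t =>
    match pvBest ys t with
    | none => some (i, pvVal ys i)
    | some (j, v) => if v ≤ pvVal ys i then some (i, pvVal ys i) else some (j, v)

theorem pvBest_eq_none {ys : List Int} {l : List Int} : pvBest ys l = none ↔ l = [] := by
  cases l with
  | nil => simp [pvBest]
  | cons i t =>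
    simp only [pvBest]
    cases pvBest ys t with
    | none => simp
    | some p => obtain ⟨j, v⟩ := p; by_cases h : v ≤ pvVal ys i <;> simp [h]

theorem pvBest_mem {ys : List Int} {l : List Int} {j v : Int}
    (h : pvBest ys l = some (j, v)) : j ∈ l ∧ v = pvVal ys j := by
  induction l generalizing j v with
  | nil => simp [pvBest] at h
  | cons i t ih =>
    simp only [pvBest] at h
    cases ht : pvBest ys t with
    | none => rw [ht] at h; simp at h; obtain ⟨rfl, rfl⟩ := h; simp
    | some p =>
      obtain ⟨j', v'⟩ := p
      rw [ht] at h
      by_cases hle : v' ≤ pvVal ys i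
      · simp [hle] at h; obtain ⟨rfl, rfl⟩ := h; simp
      · simp [hle] at h
        obtain ⟨h1, h2⟩ := h
        obtain ⟨hm, hv⟩ := ih (h1 ▸ h2 ▸ ht)
        exact ⟨List.mem_cons_of_mem _ hm, hv⟩

theorem pvBest_isMax {ys : List Int} {l : List Int} {j v : Int}
    (h : pvBest ys l = some (j, v)) : ∀ i ∈ l, pvVal ys i ≤ v := by
  induction l generalizing j v with
  | nil => simp
  | cons i t ih =>
    intro x hx
    simp only [pvBest] at h
    cases ht : pvBest ys t with
    | none =>
      rw [ht] at h; simp at h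
      obtain ⟨rfl, rfl⟩ := h
      rcases List.mem_cons.1 hx with rfl | hxt
      · exact le_refl _
      · exact absurd hxt (by simp [pvBest_eq_none.1 ht])
    | some p =>
      obtain ⟨j', v'⟩ := p
      rw [ht] at h
      by_cases hle : v' ≤ pvVal ys i
      · simp [hle] at h
        obtain ⟨rfl, rfl⟩ := h
        rcases List.mem_cons.1 hx with rfl | hxt
        · exact le_refl _
        · have := ih ht x hxt; omega
      · simp [hle] at h
        obtain ⟨rfl, rfl⟩ := h
        rcases List.mem_cons.1 hx with rfl | hxt
        · omega
        · exact ih ht x hxt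

-- pvBest picks the FIRST element of l attaining the maximum value
theorem pvBest_first {ys : List Int} {l : List Int} {j v : Int}
    (h : pvBest ys l = some (j, v)) :
    ∃ l1 l2, l = l1 ++ j :: l2 ∧ ∀ i ∈ l1, pvVal ys i < v := by
  induction l generalizing j v with
  | nil => simp [pvBest] at h
  | cons i t ih =>
    simp only [pvBest] at h
    cases ht : pvBest ys t with
    | none =>
      rw [ht] at h; simp at h; obtain ⟨rfl, rfl⟩ := h
      exact ⟨[], t, rfl, by simp⟩
    | some p =>
      obtain ⟨j', v'⟩ := p
      rw [ht] at h
      by_cases hle : v' ≤ pvVal ys i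
      · simp [hle] at h; obtain ⟨rfl, rfl⟩ := h
        exact ⟨[], t, rfl, by simp⟩
      · simp [hle] at h
        obtain ⟨rfl, rfl⟩ := h
        obtain ⟨l1, l2, rfl, hlt⟩ := ih ht
        refine ⟨i :: l1, l2, rfl, ?_⟩
        intro x hx
        rcases List.mem_cons.1 hx with rfl | hx1
        · omega
        · exact hlt x hx1

-- ---- the sort order of B: lex (-value, index), as the Bool comparator sorted2 uses ----
def pvLt (v : Int → Int) (a b : Int) : Bool :=
  decide (-(v a) < -(v b)) || (!decide (-(v b) < -(v a)) && decide (a < b))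

theorem pvLt_true_iff (v : Int → Int) (a b : Int) :
    pvLt v a b = true ↔ (v b < v a ∨ (v b ≤ v a ∧ a < b)) := by
  simp only [pvLt, Bool.or_eq_true, Bool.and_eq_true, Bool.not_eq_eq_eq_not, Bool.not_true,
    decide_eq_true_eq, decide_eq_false_iff_not]
  omega

theorem pvLt_false_iff (v : Int → Int) (a b : Int) :
    pvLt v a b = false ↔ (v a < v b ∨ (v a = v b ∧ b ≤ a)) := by
  simp [pvLt]
  omega

theorem pvInsertBy_nil (before : Int → Int → Bool) (x : Int) :
    PySem.List.insertBy before x [] = [x] := rfl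

theorem pvInsertBy_cons (before : Int → Int → Bool) (x y : Int) (ys : List Int) :
    PySem.List.insertBy before x (y :: ys) =
      if before x y then x :: y :: ys else y :: PySem.List.insertBy before x ys := rfl

-- insertion keeps the list Pairwise "not-inverted" for the lex comparator
theorem pvInsertBy_pairwise (v : Int → Int) (x : Int) :
    ∀ (l : List Int), l.Pairwise (fun a b => pvLt v b a = false) →
      (PySem.List.insertBy (pvLt v) x l).Pairwise (fun a b => pvLt v b a = false) := by
  intro l
  induction l with
  | nil => intro _; simp [pvInsertBy_nil]
  | cons y t ih =>
    intro h
    obtain ⟨hy, ht⟩ := List.pairwise_cons.1 h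
    rw [pvInsertBy_cons]
    by_cases hb : pvLt v x y = true
    · rw [if_pos hb]
      rw [pvLt_true_iff] at hb
      refine List.pairwise_cons.2 ⟨?_, h⟩
      intro z hz
      rcases List.mem_cons.1 hz with rfl | hzt
      · rw [pvLt_false_iff]; omega
      · have := hy z hzt
        rw [pvLt_false_iff] at this ⊢
        omega
    · rw [if_neg hb]
      rw [Bool.not_eq_true] at hb
      refine List.pairwise_cons.2 ⟨?_, ih ht⟩
      intro z hz
      rcases (PySem.List.insertBy_mem_iff _ _ _ _).1 hz with rfl | hzt
      · exact hb
      · exact hy z hzt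

theorem pvFoldInsert_pairwise (v : Int → Int) :
    ∀ (xs acc : List Int), acc.Pairwise (fun a b => pvLt v b a = false) →
      (xs.foldl (fun acc x => PySem.List.insertBy (pvLt v) x acc) acc).Pairwise
        (fun a b => pvLt v b a = false) := by
  intro xs
  induction xs with
  | nil => intro acc h; exact h
  | cons x t ih =>
    intro acc h
    exact ih _ (pvInsertBy_pairwise v x acc h)

-- find? on a lex-sorted list returns a lex-minimal satisfying element
theorem pvFind?_sorted (v : Int → Int) (p : Int → Bool) :
    ∀ (s : List Int), s.Pairwise (fun a b => pvLt v b a = false) →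
      ∀ {e : Int}, s.find? p = some e →
        p e = true ∧ e ∈ s ∧ ∀ x ∈ s, p x = true → pvLt v x e = false := by
  intro s
  induction s with
  | nil => intro _ e h; simp at h
  | cons y t ih =>
    intro h e hf
    obtain ⟨hy, ht⟩ := List.pairwise_cons.1 h
    by_cases py : p y = true
    · rw [List.find?_cons_of_pos py] at hf
      obtain rfl := Option.some.inj hf
      refine ⟨py, List.mem_cons_self, ?_⟩
      intro x hx _
      rcases List.mem_cons.1 hx with rfl | hxt
      · rw [pvLt_false_iff]; omega
      · exact hy x hxt
    · rw [List.find?_cons_of_neg (by simpa using py)] at hf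
      obtain ⟨pe, he, hmin⟩ := ih ht hf
      refine ⟨pe, List.mem_cons_of_mem _ he, ?_⟩
      intro x hx hpx
      rcases List.mem_cons.1 hx with rfl | hxt
      · exact absurd hpx py
      · exact hmin x hxt hpx

-- the candidate list is strictly increasing, hence so is its local-max sublist
theorem pvRange_pairwise_lt (a b : Int) :
    (PySem.List.pyRange a b).Pairwise (· < ·) := by
  rw [PySem.List.pyRange_one]
  rw [List.pairwise_map]
  exact (List.pairwise_lt_range).imp (by intro k k' hk; omega)

-- A's fold over any index list computes the first-wins best of the filtered candidates
-- whose value exceeds the running threshold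
theorem pvVal_eq (ys : List Int) (i : Int) : PySem.List.pyGetD ys i 0 = pvVal ys i := rfl

theorem pvFoldA (ys : List Int) (l : List Int) (bi : Option Int) (b : Int) :
    l.foldl
      (fun (st : Option Int × Int) i =>
        if PySem.List.pyGetD ys (i - 1) 0 ≤ PySem.List.pyGetD ys i 0 ∧
           PySem.List.pyGetD ys (i + 1) 0 ≤ PySem.List.pyGetD ys i 0 ∧
           st.2 < PySem.List.pyGetD ys i 0
        then (some i, PySem.List.pyGetD ys i 0)
        else st)
      (bi, b) =
    match pvBest ys (l.filter (pvLMb ys)) with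
    | none => (bi, b)
    | some (j, v) => if b < v then (some j, v) else (bi, b) := by
  simp only [pvVal_eq]
  induction l generalizing bi b with
  | nil => simp [pvBest]
  | cons i t ih =>
    by_cases hlm : pvLMb ys i = true
    · have hlm' : pvVal ys (i - 1) ≤ pvVal ys i ∧ pvVal ys (i + 1) ≤ pvVal ys i := by
        simpa [pvLMb] using hlm
      rw [List.filter_cons_of_pos hlm]
      by_cases hb : b < pvVal ys i
      · rw [List.foldl_cons, if_pos ⟨hlm'.1, hlm'.2, hb⟩, ih]
        simp only [pvBest]
        cases ht : pvBest ys (t.filter (pvLMb ys)) with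
        | none => simp [hb]
        | some p =>
          obtain ⟨j, v⟩ := p
          by_cases hle : v ≤ pvVal ys i
          · have h1 : ¬ pvVal ys i < v := by omega
            simp [hle, hb, h1]
          · have h1 : pvVal ys i < v := by omega
            have h2 : b < v := by omega
            simp [hle, h1, h2]
      · rw [List.foldl_cons, if_neg (by intro hc; exact hb hc.2.2), ih]
        simp only [pvBest]
        cases ht : pvBest ys (t.filter (pvLMb ys)) with
        | none => simp [hb]
        | some p =>
          obtain ⟨j, v⟩ := p
          by_cases hle : v ≤ pvVal ys i
          · have h2 : ¬ b < v := by omega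
            simp [hle, hb, h2]
          · simp [hle]
    · have hlm' : ¬ (pvVal ys (i - 1) ≤ pvVal ys i ∧ pvVal ys (i + 1) ≤ pvVal ys i ∧
          b < pvVal ys i) := by
        intro hc
        exact hlm (by simp [pvLMb]; exact ⟨hc.1, hc.2.1⟩)
      rw [List.foldl_cons, if_neg hlm', ih, List.filter_cons_of_neg (by simpa using hlm)]

-- membership in the local-max candidate list, in the Nat form D_ speaks
theorem pvMem_filt {points : List (Int × Int)} {i : Int}
    (h : i ∈ (PySem.List.pyRange 1 (((points.map Prod.snd).length : Int) - 1) 1).filter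
        (pvLMb (points.map Prod.snd))) :
    ∃ k : Nat, i = (k : Int) ∧ k ∈ List.range points.length ∧
      pvPeak (points.map Prod.snd) k = true := by
  set ys := points.map Prod.snd with hys
  have hlen : ys.length = points.length := by simp [hys]
  obtain ⟨hm, hlm⟩ := List.mem_filter.1 h
  rw [PySem.List.mem_pyRange_one] at hm
  have hlm' : pvVal ys (i - 1) ≤ pvVal ys i ∧ pvVal ys (i + 1) ≤ pvVal ys i := by
    simpa [pvLMb] using hlm
  refine ⟨i.toNat, by omega, by simp [List.mem_range]; omega, ?_⟩
  have e1 : i - 1 = ((i.toNat - 1 : Nat) : Int) := by omega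
  have e3 : i + 1 = ((i.toNat + 1 : Nat) : Int) := by omega
  have h1 := hlm'.1; have h2 := hlm'.2
  rw [e1, show i = ((i.toNat : Nat) : Int) by omega] at h1
  rw [e3, show i = ((i.toNat : Nat) : Int) by omega] at h2
  rw [pvVal, pvVal, PySem.List.pyGetD_natCast, PySem.List.pyGetD_natCast] at h1 h2
  simp only [pvPeak, decide_eq_true_eq]
  exact ⟨by omega, by omega, h1, h2⟩

-- the Nat form back into the candidate list
theorem pvMem_filt' {points : List (Int × Int)} {k : Nat}
    (h : pvPeak (points.map Prod.snd) k = true) :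
    (k : Int) ∈ (PySem.List.pyRange 1 (((points.map Prod.snd).length : Int) - 1) 1).filter
        (pvLMb (points.map Prod.snd)) := by
  set ys := points.map Prod.snd with hys
  simp only [pvPeak, decide_eq_true_eq] at h
  obtain ⟨hk1, hk2, h1, h2⟩ := h
  refine List.mem_filter.2 ⟨PySem.List.mem_pyRange_one.2 ⟨by omega, by omega⟩, ?_⟩
  have e1 : (k : Int) - 1 = ((k - 1 : Nat) : Int) := by omega
  have e3 : (k : Int) + 1 = ((k + 1 : Nat) : Int) := by omega
  simp only [pvLMb, pvVal, e1, e3, PySem.List.pyGetD_natCast]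
  simp only [Bool.and_eq_true, decide_eq_true_eq]
  exact ⟨h1, h2⟩

theorem pvMain (points : List (Int × Int)) :
    6 ≤ points.length →
    (detect_bounce_index points = detect_bounce_index_alt points ↔
      ¬ D_detect_bounce_index points) ∧
    (D_detect_bounce_index points →
      detect_bounce_index points = none ∧ detect_bounce_index_alt points ≠ none) := by
  intro h6
  set ys := points.map Prod.snd with hys
  have hlen : ys.length = points.length := by simp [hys]
  have hnlt : ¬ points.length < 6 := by omega
  set cands := PySem.List.pyRange 1 ((ys.length : Int) - 1) 1 with hcands
  set filt := cands.filter (pvLMb ys) with hfilt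
  set srt := PySem.List.sorted2 cands (fun i => -(PySem.List.pyGetD ys i 0)) (fun i => i) false
    with hsrt
  have hA : detect_bounce_index points =
      (match pvBest ys filt with
       | none => ((none : Option Int), (-1 : Int))
       | some (j, v) => if (-1 : Int) < v then (some j, v) else (none, -1)).1 := by
    unfold detect_bounce_index
    rw [if_neg hnlt]
    simp only [← hys]
    rw [pvFoldA ys _ none (-1), ← hfilt]
  have hB : detect_bounce_index_alt points = srt.find? (pvLMb ys) := by
    unfold detect_bounce_index_alt
    rw [if_neg hnlt]
    rfl
  -- the sorted candidate list: pairwise lex order, same members as cands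
  have hpair : srt.Pairwise (fun a b => pvLt (pvVal ys) b a = false) := by
    have : srt = cands.foldl
        (fun acc x => PySem.List.insertBy (pvLt (pvVal ys)) x acc) [] := rfl
    rw [this]
    exact pvFoldInsert_pairwise (pvVal ys) cands [] (by simp)
  have hmem_srt : ∀ x : Int, x ∈ srt ↔ x ∈ cands := fun x =>
    (PySem.List.sorted2_perm cands _ _ false).mem_iff
  cases hbest : pvBest ys filt with
  | none =>
    have hnil : filt = [] := pvBest_eq_none.1 hbest
    have hBn : detect_bounce_index_alt points = none := by
      rw [hB, List.find?_eq_none]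
      intro x hx hpx
      have : x ∈ filt := List.mem_filter.2 ⟨(hmem_srt x).1 hx, hpx⟩
      rw [hnil] at this
      simp at this
    constructor
    · rw [hA, hbest, hBn]
      constructor
      · intro _ hD
        obtain ⟨_, hany⟩ := hD
        obtain ⟨m, hmax, hm⟩ := (pvAny_iff _).1 hany
        obtain ⟨k, hpk, rfl⟩ := (mem_pvPeaks _ _).1 (List.max?_mem hmax)
        have := pvMem_filt' hpk
        rw [← hys, ← hcands, ← hfilt, hnil] at this
        simp at this
      · intro _; rfl
    · intro hD
      obtain ⟨_, hany⟩ := hD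
      obtain ⟨m, hmax, hm⟩ := (pvAny_iff _).1 hany
      obtain ⟨k, hpk, rfl⟩ := (mem_pvPeaks _ _).1 (List.max?_mem hmax)
      have := pvMem_filt' hpk
      rw [← hys, ← hcands, ← hfilt, hnil] at this
      simp at this
  | some p =>
    obtain ⟨j, v⟩ := p
    have hmemj : j ∈ filt ∧ v = pvVal ys j := pvBest_mem hbest
    have hjf := List.mem_filter.1 hmemj.1
    -- B returns some j: find? on the sorted list hits exactly the best element
    have hBj : detect_bounce_index_alt points = some j := by
      rw [hB]
      cases hf : srt.find? (pvLMb ys) with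
      | none =>
        rw [List.find?_eq_none] at hf
        exact absurd hjf.2 (hf j ((hmem_srt j).2 hjf.1))
      | some e =>
        obtain ⟨pe, hes, hmin⟩ := pvFind?_sorted (pvVal ys) (pvLMb ys) srt hpair hf
        have hef : e ∈ filt := List.mem_filter.2 ⟨(hmem_srt e).1 hes, pe⟩
        -- e is lex-minimal among filt: value maximal, index minimal on ties
        have hje := hmin j ((hmem_srt j).2 hjf.1) hjf.2
        rw [pvLt_false_iff] at hje
        have hjv : v = pvVal ys j := hmemj.2
        have hv_e : pvVal ys e ≤ v := pvBest_isMax hbest e hef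
        rw [hjv] at hv_e
        have hveq : pvVal ys e = pvVal ys j := by omega
        have hej : e ≤ j := by omega
        -- j is the first achiever in the increasing list filt, so j ≤ e
        have hfpair : filt.Pairwise (· < ·) := by
          rw [hfilt, hcands]
          exact List.Pairwise.filter _ (pvRange_pairwise_lt _ _)
        obtain ⟨l1, l2, hsplit, hl1⟩ := pvBest_first hbest
        have hje2 : j ≤ e := by
          rw [hsplit] at hef hfpair
          rcases List.mem_append.1 hef with h1 | h2
          · exact absurd hveq (by have := hl1 e h1; rw [hjv] at this; omega)
          · rcases List.mem_cons.1 h2 with rfl | h3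
            · exact le_refl _
            · have := (List.pairwise_append.1 hfpair).2.1
              have := (List.pairwise_cons.1 (List.pairwise_append.1 hfpair).2.1).1 e h3
              omega
        have : e = j := by omega
        rw [this]
    -- A returns some j iff -1 < v
    by_cases hv : (-1 : Int) < v
    · have hAj : detect_bounce_index points = some j := by rw [hA, hbest]; simp [hv]
      have hnD : ¬ D_detect_bounce_index points := by
        intro hD
        obtain ⟨_, hany⟩ := hD
        obtain ⟨m, hmax, hm⟩ := (pvAny_iff _).1 hany
        have hjmem := hmemj.1
        rw [hfilt, hcands, hys] at hjmem
        obtain ⟨k, rfl, hkm, hpk⟩ := pvMem_filt hjmem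
        have hvk : v = ys.getD k 0 := by
          rw [hmemj.2, pvVal, PySem.List.pyGetD_natCast]
        have hvmem : v ∈ pvPeaks (points.map Prod.snd) :=
          (mem_pvPeaks _ _).2 ⟨k, hpk, by rw [hvk, hys]⟩
        have := (List.max?_eq_some_iff.1 hmax).2 v hvmem
        omega
      exact ⟨by rw [hAj, hBj]; simp [hnD], fun hD => absurd hD hnD⟩
    · have hAn : detect_bounce_index points = none := by rw [hA, hbest]; simp [hv]
      have hD : D_detect_bounce_index points := by
        refine ⟨h6, (pvAny_iff _).2 ?_⟩
        have hjmem := hmemj.1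
        rw [hfilt, hcands, hys] at hjmem
        obtain ⟨k, rfl, hkm, hpk⟩ := pvMem_filt hjmem
        have hvmem : (points.map Prod.snd).getD k 0 ∈ pvPeaks (points.map Prod.snd) :=
          (mem_pvPeaks _ _).2 ⟨k, hpk, rfl⟩
        cases hmax : (pvPeaks (points.map Prod.snd)).max? with
        | none =>
          rw [List.max?_eq_none_iff.1 hmax] at hvmem
          simp at hvmem
        | some m =>
          refine ⟨m, rfl, ?_⟩
          obtain ⟨k', hpk', rfl⟩ := (mem_pvPeaks _ _).1 (List.max?_mem hmax)
          have hmem' := pvMem_filt' hpk'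
          rw [← hys, ← hcands, ← hfilt] at hmem'
          have := pvBest_isMax hbest _ hmem'
          have hvk : pvVal ys (k' : Int) = ys.getD k' 0 := by
            rw [pvVal, PySem.List.pyGetD_natCast]
          rw [← hys]
          omega
      constructor
      · rw [hAn, hBj]; simp [hD]
      · intro _; exact ⟨hAn, by rw [hBj]; simp⟩

-- ===== VERDICT (by name: the statement is the Claim_ definition above) =====
theorem detect_bounce_index_spec : Claim_unchanged_detect_bounce_index := by
  intro points _ hnD
  by_cases h6 : 6 ≤ points.length
  · exact ((pvMain points h6).1).2 hnD
  · unfold detect_bounce_index detect_bounce_index_alt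
    rw [if_pos (by omega), if_pos (by omega)]

theorem detect_bounce_index_changed : Claim_changed_detect_bounce_index := by
  unfold Claim_changed_detect_bounce_index; decide

theorem detect_bounce_index_tight : Claim_exact_detect_bounce_index := by
  intro points _ hD
  have h6 : 6 ≤ points.length := hD.1
  obtain ⟨hAn, hBn⟩ := (pvMain points h6).2 hD
  rw [hAn]
  exact fun hc => hBn hc.symm
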